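-- pv_equiv track=rewrite | github.com/helpming/quiz | 프로그래머스/lv2/42586. 기능개발/기능개발.py | solution
-- ===== SOURCE A (Python) =====
-- from collections import deque
--
-- def solution(progresses, speeds):
--     answer = []
--     days = deque()
--     for progress, speed in zip(progresses, speeds):
--         if (100 - progress) % speed == 0:
--             day = (100 - progress) // speed
--             days.append(day)
--         else:
--             day = (100 - progress) // speed + 1
--             days.append(day)
--     while days:
--         d = days.popleft()
--         count = 1
--         while days and d >= days[0]:
--             days.popleft()
--             count += 1
--         if count > 0:
--             answer.append(count)
--
--     return answer
-- ===== SOURCE B (Python) =====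
-- def solution(progresses, speeds):
--     # finishing day = ceil((100-p)/s), computed as -((p-100)//s); then one flat
--     # forward scan grouping by the batch leader's day, instead of a deque with
--     # nested popleft loops.
--     days = [-((progress - 100) // speed) for progress, speed in zip(progresses, speeds)]
--     if not days:
--         return []
--     answer = []
--     leader = days[0]
--     count = 0
--     for d in days:
--         if d <= leader:
--             count += 1
--         else:
--             answer.append(count)
--             leader = d
--             count = 1
--     answer.append(count)
--     return answer
-- ===== Notes on version B (the rewrite author's own statement) =====
-- stated objective: simpler
-- what changed: The two-branch modulo test becomes a single ceiling-division expression -((p-100)//s), and the deque with nested while/popleft loops becomes one flat forward scan over a plain list keeping the current batch leader and a counter.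
import Mathlib
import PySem

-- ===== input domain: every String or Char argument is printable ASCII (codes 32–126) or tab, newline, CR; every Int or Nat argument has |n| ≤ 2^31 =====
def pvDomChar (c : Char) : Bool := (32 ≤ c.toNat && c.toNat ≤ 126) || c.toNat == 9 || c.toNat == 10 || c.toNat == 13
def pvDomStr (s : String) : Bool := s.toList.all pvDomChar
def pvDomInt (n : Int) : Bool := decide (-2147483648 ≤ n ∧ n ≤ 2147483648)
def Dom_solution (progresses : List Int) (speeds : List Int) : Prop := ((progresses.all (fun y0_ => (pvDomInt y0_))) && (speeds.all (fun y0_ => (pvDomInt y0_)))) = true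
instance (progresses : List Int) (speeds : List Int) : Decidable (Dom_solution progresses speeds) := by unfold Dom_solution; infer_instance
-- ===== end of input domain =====

-- B replaces A's deque with nested popleft loops by a ceiling-division day list
-- and one flat grouping scan; objective: simpler.


-- ===== PORT A =====
-- A's day-building for loop (append to the deque, branch on exact divisibility)
def pvDaysA : List (Int × Int) → List Int → List Int
  | [], days => days
  | ps :: rest, days =>
      if PySem.Int.mod (100 - ps.1) ps.2 = 0 then
        pvDaysA rest (days ++ [PySem.Int.floordiv (100 - ps.1) ps.2])
      else
        pvDaysA rest (days ++ [PySem.Int.floordiv (100 - ps.1) ps.2 + 1])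

-- A's inner while loop: pop from the front while d >= days[0], counting
def pvInner (d : Int) : List Int → Int → Int × List Int
  | [], count => (count, [])
  | x :: rest, count => if d ≥ x then pvInner d rest (count + 1) else (count, x :: rest)

theorem pvInner_len (d : Int) : ∀ (l : List Int) (c : Int), (pvInner d l c).2.length ≤ l.length := by
  intro l
  induction l with
  | nil => intro c; simp [pvInner]
  | cons x xs ih =>
      intro c
      by_cases h : d ≥ x
      · simpa [pvInner, h] using Nat.le_succ_of_le (ih (c + 1))
      · simp [pvInner, h]

-- A's outer while loop over the deque
def pvOuter : List Int → List Int → List Int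
  | [], answer => answer
  | d :: rest, answer =>
      let r := pvInner d rest 1
      pvOuter r.2 (if r.1 > 0 then answer ++ [r.1] else answer)
termination_by l _ => l.length
decreasing_by
  simpa using Nat.lt_succ_of_le (pvInner_len d rest 1)

def solution (progresses : List Int) (speeds : List Int) : List Int :=
  pvOuter (pvDaysA (progresses.zip speeds) []) []

-- ===== PORT B =====
-- B's flat grouping scan: leader of the current batch, running count, accumulator
def pvScan : List Int → Int → Int → List Int → List Int
  | [], _, count, acc => acc ++ [count]
  | d :: rest, leader, count, acc =>
      if d ≤ leader then pvScan rest leader (count + 1) acc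
      else pvScan rest d 1 (acc ++ [count])

def solution_alt (progresses : List Int) (speeds : List Int) : List Int :=
  let days := (progresses.zip speeds).map (fun ps => -(PySem.Int.floordiv (ps.1 - 100) ps.2))
  match days with
  | [] => []
  | leader0 :: _ => pvScan days leader0 0 []

-- ===== PRECONDITION & SPEC =====
-- Pre_ excludes exactly the inputs where some speed paired with a progress is 0:
-- there A raises ZeroDivisionError (and so does B).
def Pre_solution (progresses : List Int) (speeds : List Int) : Prop :=
  ∀ ps ∈ progresses.zip speeds, ps.2 ≠ 0
instance (progresses : List Int) (speeds : List Int) : Decidable (Pre_solution progresses speeds) := by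
  unfold Pre_solution; infer_instance

def pvWitness_solution : List Int × List Int := ([93, 30, 55], [1, 30, 5])

def Spec_solution (progresses : List Int) (speeds : List Int) (out : List Int) : Prop := out = solution_alt progresses speeds
instance (progresses : List Int) (speeds : List Int) (out : List Int) : Decidable (Spec_solution progresses speeds out) := by unfold Spec_solution; infer_instance

-- ===== CLAIM (what is proved, stated in full; the proofs are below) =====
def Claim_equal_solution : Prop := ∀ (progresses : List Int) (speeds : List Int), Dom_solution progresses speeds → Pre_solution progresses speeds → Spec_solution progresses speeds (solution progresses speeds)

-- ===== LEMMAS AND PROOFS =====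

-- ceiling division: floor division plus the divisibility branch equals -((-a) // s)
theorem pv_ceil_eq_pos (a s : Int) (hs : 0 < s) :
    (if PySem.Int.mod a s = 0 then PySem.Int.floordiv a s else PySem.Int.floordiv a s + 1) = -(PySem.Int.floordiv (-a) s) := by
  show (if Int.fmod a s = 0 then Int.fdiv a s else Int.fdiv a s + 1) = -(Int.fdiv (-a) s)
  rw [Int.fdiv_eq_ediv, Int.fdiv_eq_ediv, Int.fmod_eq_emod,
    if_pos (Or.inl (le_of_lt hs)), if_pos (Or.inl (le_of_lt hs)), if_pos (Or.inl (le_of_lt hs)),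
    Int.neg_ediv]
  have hsign : s.sign = 1 := Int.sign_eq_one_of_pos hs
  simp only [add_zero, sub_zero]
  by_cases hd : s ∣ a
  · rw [if_pos hd, if_pos (Int.emod_eq_zero_of_dvd hd)]; ring
  · rw [if_neg hd, if_neg (fun h0 => hd (Int.dvd_of_emod_eq_zero h0)), hsign]; ring

theorem pv_ceil_eq (a s : Int) (hs : s ≠ 0) :
    (if PySem.Int.mod a s = 0 then PySem.Int.floordiv a s else PySem.Int.floordiv a s + 1) = -(PySem.Int.floordiv (-a) s) := by
  rcases lt_or_gt_of_ne hs with h | h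
  · rw [← PySem.Int.floordiv_neg_neg a s, ← PySem.Int.floordiv_neg_neg (-a) s]
    have hc : (PySem.Int.mod (-a) (-s) = 0) ↔ (PySem.Int.mod a s = 0) := by
      rw [PySem.Int.mod_neg_neg]; omega
    simp only [← hc]
    exact pv_ceil_eq_pos (-a) (-s) (by omega)
  · exact pv_ceil_eq_pos a s h

-- A's day loop produces exactly B's mapped day list
theorem pvDaysA_eq_map : ∀ (zs : List (Int × Int)) (acc : List Int),
    (∀ ps ∈ zs, ps.2 ≠ 0) →
    pvDaysA zs acc = acc ++ zs.map (fun ps => -(PySem.Int.floordiv (ps.1 - 100) ps.2)) := by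
  intro zs
  induction zs with
  | nil => intro acc _; simp [pvDaysA]
  | cons ps rest ih =>
      intro acc h
      have hs : ps.2 ≠ 0 := h ps (List.mem_cons_self ..)
      have hrest : ∀ q ∈ rest, q.2 ≠ 0 := fun q hq => h q (List.mem_cons_of_mem _ hq)
      have hc := pv_ceil_eq (100 - ps.1) ps.2 hs
      have hneg : -(100 - ps.1) = ps.1 - 100 := by ring
      rw [hneg] at hc
      by_cases h0 : PySem.Int.mod (100 - ps.1) ps.2 = 0
      · rw [if_pos h0] at hc
        simp only [pvDaysA, if_pos h0, ih _ hrest, List.map_cons, hc]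
        simp
      · rw [if_neg h0] at hc
        simp only [pvDaysA, if_neg h0, ih _ hrest, List.map_cons, hc]
        simp

theorem pvInner_fst_ge (d : Int) : ∀ (l : List Int) (c : Int), c ≤ (pvInner d l c).1 := by
  intro l
  induction l with
  | nil => intro c; simp [pvInner]
  | cons x xs ih =>
      intro c
      by_cases h : d ≥ x
      · simpa [pvInner, h] using le_trans (by omega) (ih (c + 1))
      · simp [pvInner, h]

-- B's flat scan equals A's inner-pop-then-outer-loop decomposition
theorem pvScan_eq : ∀ (l : List Int) (d count : Int) (acc : List Int), 0 < count →
    pvScan l d count acc = pvOuter (pvInner d l count).2 (acc ++ [(pvInner d l count).1]) := by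
  intro l
  induction l with
  | nil => intro d count acc _; simp [pvScan, pvInner, pvOuter]
  | cons x xs ih =>
      intro d count acc hc
      by_cases h : x ≤ d
      · have h' : d ≥ x := h
        simp only [pvScan, if_pos h, pvInner]
        exact ih d (count + 1) acc (by omega)
      · have h' : ¬ d ≥ x := h
        simp only [pvScan, if_neg h, pvInner]
        rw [ih x 1 (acc ++ [count]) (by omega)]
        have hge : (0:Int) < (pvInner x xs 1).1 := lt_of_lt_of_le (by omega) (pvInner_fst_ge x xs 1)
        simp only [pvOuter, if_pos hge]

-- ===== VERDICT (by name: the statement is the Claim_ definition above) =====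
theorem solution_spec : Claim_equal_solution := by
  intro progresses speeds _ hpre
  unfold Spec_solution solution solution_alt
  rw [pvDaysA_eq_map _ [] hpre]
  simp only [List.nil_append]
  cases hdl : (progresses.zip speeds).map (fun ps => -(PySem.Int.floordiv (ps.1 - 100) ps.2)) with
  | nil => simp [pvOuter]
  | cons d rest =>
      simp only [pvOuter, pvScan, if_pos (le_refl d)]
      norm_num
      rw [pvScan_eq rest d 1 [] (by omega)]
      have hge : (0:Int) < (pvInner d rest 1).1 := lt_of_lt_of_le (by omega) (pvInner_fst_ge d rest 1)
      simp only [if_pos hge, List.nil_append]
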